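-- pv_equiv track=rewrite | github.com/Seunghoon-Schini-Yang/Algorithm_Schini | 백준/Gold/2565. 전깃줄/전깃줄.py | solution
-- ===== SOURCE A (Python) =====
-- def solution(n: int, arr: list) -> int:
--     arr.sort()
--     dp = [arr[0][1]]
--
--     for i in range(1, n):
--         if arr[i][1] > dp[-1]:
--             dp.append(arr[i][1])
--         else:
--             dp[binary_search(0, len(dp) - 1, arr[i][1], dp)] = arr[i][1]
--
--     return n - len(dp)
--
-- def binary_search(l: int, r: int, arr_i: int, seq: list) -> int:
--     while l <= r:
--         m = (l + r) // 2
--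
--         if arr_i < seq[m]:
--             r = m - 1
--         else:
--             l = m + 1
--     return l
-- ===== SOURCE B (Python) =====
-- # Same task, but LIS via the classic O(n^2) DP table instead of patience sorting
-- # with a hand-rolled binary search. Sorts arr in place like the original.
-- def solution(n: int, arr: list) -> int:
--     arr.sort()
--     dp = [1]
--     for i in range(1, n):
--         best = 1
--         for j in range(i):
--             if arr[j][1] < arr[i][1] and dp[j] + 1 > best:
--                 best = dp[j] + 1
--         dp.append(best)
--     return n - max(dp)
-- ===== Notes on version B (the rewrite author's own statement) =====
-- stated objective: alternative
-- what changed: Replaced patience sorting (tails array maintained with a hand-written binary search) by the classic O(n^2) LIS dynamic-programming table dp[i] = 1 + max dp[j] over j<i with arr[j][1] < arr[i][1], returning n - max(dp).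
-- outside the precondition, e.g. on solution(4, [(1, 3), (2, 7), (3, 3), (4, 5)]): A returns 1, B returns 2
import Mathlib
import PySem

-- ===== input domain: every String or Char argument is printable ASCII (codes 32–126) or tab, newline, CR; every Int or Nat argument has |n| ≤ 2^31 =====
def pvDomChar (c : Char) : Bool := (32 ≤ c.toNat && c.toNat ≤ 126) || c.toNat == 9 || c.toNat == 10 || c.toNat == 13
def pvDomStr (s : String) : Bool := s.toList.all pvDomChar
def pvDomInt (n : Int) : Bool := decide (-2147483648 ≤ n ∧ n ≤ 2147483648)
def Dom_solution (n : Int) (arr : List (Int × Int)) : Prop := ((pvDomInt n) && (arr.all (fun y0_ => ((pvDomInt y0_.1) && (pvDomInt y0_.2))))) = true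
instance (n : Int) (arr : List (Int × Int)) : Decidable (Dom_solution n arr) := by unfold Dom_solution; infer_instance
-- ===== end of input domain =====

-- B replaces A's patience-sorting single pass (tails + hand-written binary search) by the
-- classic O(n^2) LIS dynamic program over the same sorted array; equivalence is about the
-- return value only (both Pythons sort arr in place, the same mutation).

-- ===== PORT A =====
-- Python helper binary_search: while-loop as well-founded recursion on r+1-l.
-- seq[m] is ported as pyGetD; inside A's solution the index m is always in range (0 ≤ l ≤ m ≤ r < len(seq)),
-- so the default is never consulted on inputs admitted by Pre_solution.
def binary_search (l : Int) (r : Int) (arr_i : Int) (seq : List Int) : Int :=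
  if _h : l ≤ r then
    let m := PySem.Int.floordiv (l + r) 2
    if arr_i < PySem.List.pyGetD seq m 0 then binary_search l (m - 1) arr_i seq
    else binary_search (m + 1) r arr_i seq
  else l
termination_by (r + 1 - l).toNat
decreasing_by
  · have hb := PySem.Int.floordiv_two_mid_bounds _h
    omega
  · have hb := PySem.Int.floordiv_two_mid_bounds _h
    omega

-- the body of A's for-loop: dp[-1] is pyGetD dp (-1); the assignment dp[k] = x is pySetD
-- (under Pre_solution the computed index is always in range, so pySetD is exact).
def solStep (dp : List Int) (x : Int) : List Int :=
  if PySem.List.pyGetD dp (-1) 0 < x then dp ++ [x]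
  else PySem.List.pySetD dp (binary_search 0 ((dp.length : Int) - 1) x dp) x

def solution (n : Int) (arr : List (Int × Int)) : Int :=
  let sa := PySem.List.sorted2 arr Prod.fst Prod.snd false
  let dp0 : List Int := [(PySem.List.pyGetD sa 0 (0, 0)).2]
  let dp := (PySem.List.pyRange 1 n 1).foldl
      (fun dp i => solStep dp (PySem.List.pyGetD sa i (0, 0)).2) dp0
  n - (dp.length : Int)

-- ===== PORT B =====
def solution_alt (n : Int) (arr : List (Int × Int)) : Int :=
  let sa := PySem.List.sorted2 arr Prod.fst Prod.snd false
  let dp := (PySem.List.pyRange 1 n 1).foldl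
      (fun dp i =>
        let best := (PySem.List.pyRange 0 i 1).foldl
          (fun best j =>
            if (PySem.List.pyGetD sa j (0, 0)).2 < (PySem.List.pyGetD sa i (0, 0)).2 ∧
               PySem.List.pyGetD dp j 0 + 1 > best
            then PySem.List.pyGetD dp j 0 + 1 else best) 1
        dp ++ [best]) [1]
  n - ((PySem.List.max? dp (fun v => v)).getD 0)

-- ===== PRECONDITION & SPEC =====
-- Pre_ excludes: (a) empty arr or n > len(arr), where A raises IndexError; (b) duplicate second
-- coordinates (two wires on one right pole — invalid for the problem's input): there A's
-- bisect-right replacement either raises IndexError or accidentally counts non-strict chains.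
def Pre_solution (n : Int) (arr : List (Int × Int)) : Prop :=
  arr ≠ [] ∧ n ≤ (arr.length : Int) ∧ (arr.map Prod.snd).Nodup
instance (n : Int) (arr : List (Int × Int)) : Decidable (Pre_solution n arr) := by
  unfold Pre_solution; infer_instance

def pvWitness_solution : Int × (List (Int × Int)) := (3, [(2, 2), (1, 3), (3, 1)])

def Spec_solution (n : Int) (arr : List (Int × Int)) (out : Int) : Prop := out = solution_alt n arr
instance (n : Int) (arr : List (Int × Int)) (out : Int) : Decidable (Spec_solution n arr out) := by
  unfold Spec_solution; infer_instance

-- ===== CLAIM (what is proved, stated in full; the proofs are below) =====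
def Claim_equal_solution : Prop := ∀ (n : Int) (arr : List (Int × Int)),
  Dom_solution n arr → Pre_solution n arr → Spec_solution n arr (solution n arr)

-- ===== LEMMAS AND PROOFS =====

-- Lb p x = length of the longest strictly increasing subsequence of p whose last element is < x,
-- Ml p = length of the longest strictly increasing subsequence of p; both defined by structural
-- recursion on the REVERSED list so that the append laws below are definitional.
def LbR : List Int → Int → Nat
  | [], _ => 0
  | y :: q, x => if y < x then max (LbR q x) (LbR q y + 1) else LbR q x

def MlR : List Int → Nat
  | [] => 0
  | y :: q => max (MlR q) (LbR q y + 1)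

def Lb (p : List Int) (x : Int) : Nat := LbR p.reverse x
def Ml (p : List Int) : Nat := MlR p.reverse

theorem Lb_nil (x : Int) : Lb [] x = 0 := rfl

theorem Lb_append (p : List Int) (y x : Int) :
    Lb (p ++ [y]) x = if y < x then max (Lb p x) (Lb p y + 1) else Lb p x := by
  simp [Lb, LbR]

theorem Ml_append (p : List Int) (y : Int) :
    Ml (p ++ [y]) = max (Ml p) (Lb p y + 1) := by
  simp [Ml, Lb, MlR]

-- the boundary characterisation: k is the insertion point of x in t
def Bnd (t : List Int) (x : Int) (k : Nat) : Prop :=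
  k ≤ t.length ∧ ∀ (j : Nat) (hj : j < t.length), (j < k ↔ t[j] < x)

-- invariant of A's loop: p the processed prefix of values, t the tails list
def AInv (p t : List Int) : Prop :=
  0 < t.length ∧ (∀ v ∈ t, v ∈ p) ∧ t.length = Ml p ∧
    ∀ x, x ∉ p → Bnd t x (Lb p x)

theorem bs_eq (t : List Int) (y : Int) (k : Nat)
    (_hk : k ≤ t.length)
    (hlow : ∀ (j : Nat) (hj : j < t.length), j < k → t[j] ≤ y)
    (hhigh : ∀ (j : Nat) (hj : j < t.length), k ≤ j → y < t[j]) :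
    ∀ (fuel : Nat) (l r : Int), (r + 1 - l).toNat ≤ fuel → 0 ≤ l → l ≤ (k : Int) →
      (k : Int) ≤ r + 1 → r < (t.length : Int) →
      binary_search l r y t = (k : Int) := by
  intro fuel
  induction fuel with
  | zero =>
    intro l r hf h0 hlk hkr hr
    rw [binary_search]
    have hlr : ¬ l ≤ r := by omega
    simp only [hlr, dite_false]
    omega
  | succ fuel ih =>
    intro l r hf h0 hlk hkr hr
    rw [binary_search]
    by_cases hlr : l ≤ r
    · simp only [hlr, dite_true]
      have hm := PySem.Int.floordiv_two_mid_bounds hlr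
      set m := PySem.Int.floordiv (l + r) 2 with hmdef
      have hm0 : 0 ≤ m := by omega
      have hmlen : m < (t.length : Int) := by omega
      have hget : PySem.List.pyGetD t m 0 = t[m.toNat]'(by omega) :=
        PySem.List.pyGetD_eq_getElem t 0 hm0 hmlen
      rw [hget]
      by_cases hc : y < t[m.toNat]'(by omega)
      · simp only [hc, if_true]
        have hmk : (k : Int) ≤ m := by
          by_contra hmk
          have h1 : m.toNat < k := by omega
          have := hlow m.toNat (by omega) h1
          omega
        exact ih l (m - 1) (by omega) h0 hlk (by omega) (by omega)
      · simp only [hc, if_false]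
        have hmk : m < (k : Int) := by
          by_contra hmk
          have h1 : k ≤ m.toNat := by omega
          have := hhigh m.toNat (by omega) h1
          omega
        exact ih (m + 1) r (by omega) (by omega) (by omega) hkr hr
    · simp only [hlr, dite_false]
      omega

theorem inv_step (p t : List Int) (y : Int) (hInv : AInv p t) (hy : y ∉ p) :
    AInv (p ++ [y]) (solStep t y) := by
  obtain ⟨hpos, hmem, hlen, hbnd⟩ := hInv
  have hne : t ≠ [] := by intro h; subst h; simp at hpos
  have hyt : y ∉ t := fun hv => hy (hmem y hv)
  obtain ⟨hky, hiffy⟩ := hbnd y hy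
  set ky := Lb p y with hkydef
  have hlast : PySem.List.pyGetD t (-1) 0 = t[t.length - 1]'(by omega) := by
    rw [PySem.List.pyGetD_neg_one t 0 hne]
    exact List.getLast_eq_getElem hne
  unfold solStep
  rw [hlast]
  by_cases hc : t[t.length - 1]'(by omega) < y
  · -- append case: y is larger than every tail
    have hkylen : ky = t.length := by
      have := (hiffy (t.length - 1) (by omega)).mpr hc
      omega
    have hallto : ∀ (j : Nat) (hj : j < t.length), t[j] < y := by
      intro j hj
      exact (hiffy j hj).mp (by omega)
    simp only [hc, if_true]
    refine ⟨by simp, ?_, ?_, ?_⟩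
    · intro v hv
      rcases List.mem_append.mp hv with h | h
      · exact List.mem_append_left _ (hmem v h)
      · exact List.mem_append_right _ h
    · rw [Ml_append, ← hlen, ← hkydef, hkylen]
      simp
    · intro x hx
      have hxp : x ∉ p := fun h => hx (List.mem_append_left _ h)
      have hxy : x ≠ y := fun h => hx (by simp [h])
      obtain ⟨hc1, hiffx⟩ := hbnd x hxp
      rw [Lb_append]
      by_cases hyx : y < x
      · simp only [hyx, if_true]
        have hmax : max (Lb p x) (ky + 1) = t.length + 1 := by
          rw [hkylen]; omega
        rw [hmax]
        refine ⟨by simp, ?_⟩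
        intro j hj
        simp only [List.length_append, List.length_cons, List.length_nil] at hj
        constructor
        · intro _
          by_cases hjt : j < t.length
          · rw [List.getElem_append_left hjt]
            exact lt_trans (hallto j hjt) hyx
          · have hj' : j = t.length := by omega
            subst hj'
            simp
            exact hyx
        · intro _; omega
      · simp only [hyx, if_false]
        refine ⟨by simp; omega, ?_⟩
        intro j hj
        simp only [List.length_append, List.length_cons, List.length_nil] at hj
        by_cases hjt : j < t.length
        · rw [List.getElem_append_left hjt]
          exact hiffx j hjt
        · have hj' : j = t.length := by omega
          subst hj'
          simp
          constructor
          · intro h; omega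
          · intro h; omega
  · -- replace case: binary search position ky
    have hylast : y < t[t.length - 1]'(by omega) := by
      have : y ≠ t[t.length - 1]'(by omega) := by
        intro h
        exact hyt (h ▸ List.getElem_mem _)
      omega
    have hkylt : ky < t.length := by
      have : ¬ (t.length - 1 < ky) := by
        intro h
        have := (hiffy (t.length - 1) (by omega)).mp h
        omega
      omega
    have hbs : binary_search 0 ((t.length : Int) - 1) y t = (ky : Int) := by
      refine bs_eq t y ky (by omega) ?_ ?_ t.length 0 ((t.length : Int) - 1)
        (by omega) (by omega) (by omega) (by omega) (by omega)
      · intro j hj hjk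
        have := (hiffy j hj).mp hjk
        omega
      · intro j hj hjk
        have h1 : ¬ t[j] < y := fun h => by
          have := (hiffy j hj).mpr h
          omega
        have h2 : y ≠ t[j] := fun h => hyt (h ▸ List.getElem_mem _)
        omega
    simp only [hc, if_false]
    rw [hbs, PySem.List.pySetD_of_nonneg t y (by omega)]
    have hknat : ((ky : Int)).toNat = ky := by omega
    rw [hknat]
    have hget' : ∀ (j : Nat) (hj : j < t.length),
        (t.set ky y)[j]'(by simpa using hj) = if j = ky then y else t[j] := by
      intro j hj
      rw [List.getElem_set]
      simp [eq_comm]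
    refine ⟨by simpa using hpos, ?_, ?_, ?_⟩
    · intro v hv
      rcases List.mem_or_eq_of_mem_set hv with h | h
      · exact List.mem_append_left _ (hmem v h)
      · simp [h]
    · rw [Ml_append, ← hlen, ← hkydef]
      simp
      omega
    · intro x hx
      have hxp : x ∉ p := fun h => hx (List.mem_append_left _ h)
      have hxy : x ≠ y := fun h => hx (by simp [h])
      obtain ⟨hc1, hiffx⟩ := hbnd x hxp
      set c := Lb p x with hcdef
      rw [Lb_append, ← hcdef]
      by_cases hyx : y < x
      · simp only [hyx, if_true]
        have hkyc : ky ≤ c := by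
          by_cases h0 : ky = 0
          · omega
          · have hj : ky - 1 < t.length := by omega
            have h1 : t[ky - 1]'hj < y := (hiffy (ky - 1) hj).mp (by omega)
            have := (hiffx (ky - 1) hj).mpr (by omega)
            omega
        refine ⟨by simp; omega, ?_⟩
        intro j hj
        simp only [List.length_set] at hj
        rw [hget' j hj]
        by_cases hjk : j = ky
        · subst hjk
          simp [hyx]
          omega
        · simp only [hjk, if_false]
          have := hiffx j hj
          constructor
          · intro h
            have : j < c := by
              rcases Nat.lt_or_ge j c with h' | h'
              · exact h'
              · omega
            exact (hiffx j hj).mp this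
          · intro h
            have := (hiffx j hj).mpr h
            omega
      · simp only [hyx, if_false]
        have hxy' : x < y := by omega
        have hcky : c ≤ ky := by
          by_cases h0 : c = 0
          · omega
          · have hj : c - 1 < t.length := by omega
            have h1 : t[c - 1]'hj < x := (hiffx (c - 1) hj).mp (by omega)
            have := (hiffy (c - 1) hj).mpr (by omega)
            omega
        refine ⟨by simp; omega, ?_⟩
        intro j hj
        simp only [List.length_set] at hj
        rw [hget' j hj]
        by_cases hjk : j = ky
        · subst hjk
          simp [not_lt.mpr (le_of_lt hxy')]
          omega
        · simp only [hjk, if_false]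
          exact hiffx j hj

theorem inv_fold : ∀ (rest p t : List Int), AInv p t → (∀ v ∈ rest, v ∉ p) → rest.Nodup →
    AInv (p ++ rest) (rest.foldl solStep t) := by
  intro rest
  induction rest with
  | nil => intro p t h _ _; simpa using h
  | cons y rest ih =>
    intro p t h hfresh hnd
    have h1 : AInv (p ++ [y]) (solStep t y) :=
      inv_step p t y h (hfresh y (List.mem_cons_self))
    have h2 := ih (p ++ [y]) (solStep t y) h1
      (by
        intro v hv
        simp only [List.mem_append, List.mem_singleton]
        push Not
        exact ⟨hfresh v (List.mem_cons_of_mem _ hv),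
          fun hvy => (List.nodup_cons.mp hnd).1 (hvy ▸ hv)⟩)
      (List.nodup_cons.mp hnd).2
    simpa [List.append_assoc] using h2

theorem inv_base (h : Int) : AInv [h] [h] := by
  refine ⟨by simp, by simp, by simp [Ml, MlR, LbR], ?_⟩
  intro x hx
  constructor
  · simp only [Lb, LbR, List.reverse_cons, List.reverse_nil, List.nil_append]
    split <;> simp
  · intro j hj
    simp at hj
    subst hj
    simp [Lb, LbR]
    split <;> simp_all

theorem A_len (s0 : Int) (srest : List Int) (hnd : (s0 :: srest).Nodup) :
    (srest.foldl solStep [s0]).length = Ml (s0 :: srest) := by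
  obtain ⟨h1, h2⟩ := List.nodup_cons.mp hnd
  have h := inv_fold srest [s0] [s0] (inv_base s0)
    (by intro v hv; simp; intro hveq; exact h1 (hveq ▸ hv)) h2
  simpa using h.2.2.1

-- ===== B-side machinery =====
def dval (s : List Int) (k : Nat) : Int := (Lb (s.take k) (s.getD k 0) : Int) + 1

theorem dp_get (s : List Int) (m j : Nat) (hj : j < m) :
    PySem.List.pyGetD ((List.range m).map (dval s)) ((j : Nat) : Int) 0 = dval s j := by
  rw [PySem.List.pyGetD_eq_getElem _ 0 (by omega)
    (by simp only [List.length_map, List.length_range]; exact_mod_cast hj)]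
  simp

theorem dval_zero (s : List Int) : dval s 0 = 1 := by
  simp [dval, Lb_nil]

theorem innerB (sa : List (Int × Int)) (s : List Int)
    (hs : ∀ (k : Nat), k < s.length → (PySem.List.pyGetD sa (k : Int) (0, 0)).2 = s.getD k 0)
    (i : Nat) (hi : i < s.length) :
    ∀ (jm : Nat), jm ≤ i →
      (PySem.List.pyRange 0 (jm : Int) 1).foldl
        (fun best j =>
          if (PySem.List.pyGetD sa j (0, 0)).2 < (PySem.List.pyGetD sa (i : Int) (0, 0)).2 ∧
             PySem.List.pyGetD ((List.range i).map (dval s)) j 0 + 1 > best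
          then PySem.List.pyGetD ((List.range i).map (dval s)) j 0 + 1 else best) 1
      = (Lb (s.take jm) (s.getD i 0) : Int) + 1 := by
  intro jm
  induction jm with
  | zero =>
    intro _
    rw [PySem.List.pyRange_one_eq_nil (by omega)]
    simp [Lb_nil]
  | succ jm ih =>
    intro hjm
    have hjm' : jm ≤ i := by omega
    have hcast : ((jm + 1 : Nat) : Int) = (jm : Int) + 1 := by push_cast; ring
    rw [hcast, PySem.List.pyRange_one_succ_right (by omega), List.foldl_append,
      ih hjm', List.foldl_cons, List.foldl_nil]
    have hjlen : jm < s.length := by omega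
    rw [hs jm hjlen, hs i hi, dp_get s i jm (by omega)]
    have htake : s.take (jm + 1) = s.take jm ++ [s.getD jm 0] := by
      rw [List.take_add_one, List.getElem?_eq_getElem hjlen, Option.toList_some,
        List.getD_eq_getElem s 0 hjlen]
    rw [htake, Lb_append]
    have hd : dval s jm = (Lb (s.take jm) (s.getD jm 0) : Int) + 1 := rfl
    by_cases hlt : s.getD jm 0 < s.getD i 0
    · rw [if_pos hlt]
      by_cases hgt : dval s jm + 1 > (Lb (s.take jm) (s.getD i 0) : Int) + 1
      · rw [if_pos ⟨hlt, hgt⟩]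
        rw [hd] at hgt ⊢
        push_cast
        omega
      · rw [if_neg (by intro h; exact hgt h.2)]
        rw [hd] at hgt
        push_cast
        omega
    · rw [if_neg hlt, if_neg (by intro h; exact hlt h.1)]

theorem outerB (sa : List (Int × Int)) (s : List Int)
    (hs : ∀ (k : Nat), k < s.length → (PySem.List.pyGetD sa (k : Int) (0, 0)).2 = s.getD k 0) :
    ∀ (m : Nat), 1 ≤ m → m ≤ s.length →
      (PySem.List.pyRange 1 (m : Int) 1).foldl
        (fun dp i =>
          let best := (PySem.List.pyRange 0 i 1).foldl
            (fun best j =>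
              if (PySem.List.pyGetD sa j (0, 0)).2 < (PySem.List.pyGetD sa i (0, 0)).2 ∧
                 PySem.List.pyGetD dp j 0 + 1 > best
              then PySem.List.pyGetD dp j 0 + 1 else best) 1
          dp ++ [best]) [1]
      = (List.range m).map (dval s) := by
  intro m
  induction m with
  | zero => intro h; omega
  | succ m ih =>
    intro _ hm
    by_cases hm0 : m = 0
    · subst hm0
      rw [PySem.List.pyRange_one_eq_nil (by omega)]
      simp [List.range_succ, dval_zero]
    · have hm1 : 1 ≤ m := by omega
      have hcast : ((m + 1 : Nat) : Int) = (m : Int) + 1 := by push_cast; ring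
      rw [hcast, PySem.List.pyRange_one_succ_right (by omega), List.foldl_append,
        ih hm1 (by omega), List.foldl_cons, List.foldl_nil]
      show (List.range m).map (dval s) ++ [_] = _
      rw [innerB sa s hs m (by omega) m le_rfl]
      rw [List.range_succ, List.map_append, List.map_singleton]
      congr 1

theorem Ml_take_pos (s : List Int) : ∀ (M : Nat), M + 1 ≤ s.length → 1 ≤ Ml (s.take (M + 1)) := by
  intro M hM
  rw [List.take_add_one, List.getElem?_eq_getElem (by omega), Option.toList_some, Ml_append]
  omega

theorem maxfold (s : List Int) : ∀ (M : Nat) (a : Int), M + 1 ≤ s.length →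
    ((List.range (M + 1)).map (dval s)).foldl max a = max a (Ml (s.take (M + 1)) : Int) := by
  intro M
  induction M with
  | zero =>
    intro a h0
    have htake : s.take 1 = [] ++ [s.getD 0 0] := by
      rw [List.take_add_one, List.take_zero, List.getElem?_eq_getElem (by omega), Option.toList_some,
        List.getD_eq_getElem s 0 (by omega)]
    rw [htake, Ml_append]
    simp [List.range_succ, dval, Lb_nil, Ml]
  | succ M ih =>
    intro a hM
    rw [List.range_succ, List.map_append, List.foldl_append, ih a (by omega),
      List.map_singleton, List.foldl_cons, List.foldl_nil]
    have htake : s.take (M + 1 + 1) = s.take (M + 1) ++ [s.getD (M + 1) 0] := by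
      rw [List.take_add_one, List.getElem?_eq_getElem (by omega), Option.toList_some,
        List.getD_eq_getElem s 0 (by omega)]
    rw [htake, Ml_append]
    have hd : dval s (M + 1) = (Lb (s.take (M + 1)) (s.getD (M + 1) 0) : Int) + 1 := rfl
    rw [hd]
    push_cast
    rw [max_assoc]

theorem B_val (s : List Int) (M : Nat) (hM : M + 1 ≤ s.length) :
    (PySem.List.max? ((List.range (M + 1)).map (dval s)) (fun v => v)).getD 0
      = (Ml (s.take (M + 1)) : Int) := by
  have hrange : (List.range (M + 1 + 1 - 1)) = List.range (M + 1) := rfl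
  rw [List.range_succ_eq_map, List.map_cons]
  rw [PySem.List.max?_id_cons]
  have h1 : (List.map (dval s) (List.map (fun i => i + 1) (List.range M))).foldl max (dval s 0)
      = ((List.range (M + 1)).map (dval s)).foldl max (dval s 0) := by
    rw [List.range_succ_eq_map, List.map_cons, List.foldl_cons, max_self]
  rw [Option.getD_some, h1, maxfold s M (dval s 0) hM]
  have hd0 : dval s 0 = 1 := by
    simp [dval, Lb_nil]
  rw [hd0]
  have := Ml_take_pos s M hM
  omega

theorem main_eq (n : Int) (arr : List (Int × Int)) (hn1 : 1 ≤ n)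
    (hnlen : n ≤ (arr.length : Int)) (hnd : (arr.map Prod.snd).Nodup) :
    solution n arr = solution_alt n arr := by
  have hsalen : (PySem.List.sorted2 arr Prod.fst Prod.snd false).length = arr.length :=
    (PySem.List.sorted2_perm arr Prod.fst Prod.snd false).length_eq
  set sa := PySem.List.sorted2 arr Prod.fst Prod.snd false with hsa
  set N := n.toNat with hN
  have hNn : (N : Int) = n := Int.toNat_of_nonneg (by omega)
  have hN1 : 1 ≤ N := by omega
  have hNlen : N ≤ sa.length := by omega
  set ts := sa.take N with hts
  have htslen : ts.length = N := by rw [hts, List.length_take]; omega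
  set s := ts.map Prod.snd with hs
  have hslen : s.length = N := by rw [hs, List.length_map]; exact htslen
  have hsget : ∀ (k : Nat), k < s.length → (PySem.List.pyGetD sa (k : Int) (0, 0)).2 = s.getD k 0 := by
    intro k hk
    have hk' : k < N := by omega
    have hksa : (k : Int) < (sa.length : Int) := by exact_mod_cast (by omega : k < sa.length)
    rw [PySem.List.pyGetD_eq_getElem _ _ (by omega) hksa]
    simp only [Int.toNat_natCast]
    rw [List.getD_eq_getElem s 0 hk]
    simp only [hs, List.getElem_map, hts, List.getElem_take]
  have hnds : s.Nodup := by
    have hperm : (sa.map Prod.snd).Perm (arr.map Prod.snd) :=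
      (PySem.List.sorted2_perm arr Prod.fst Prod.snd false).map Prod.snd
    have hnd2 : (sa.map Prod.snd).Nodup := hperm.nodup_iff.mpr hnd
    have hsub : s.Sublist (sa.map Prod.snd) := by
      rw [hs, hts, List.map_take]
      exact List.take_sublist _ _
    exact hsub.nodup hnd2
  -- A's dp length equals Ml s
  have hA : solution n arr = n - (Ml s : Int) := by
    show n - _ = n - (Ml s : Int)
    congr 1
    have h1 : PySem.List.pyRange 1 n 1 = PySem.List.pyRange 1 ((ts.length : Int)) 1 := by
      rw [htslen, hNn]
    rw [h1]
    have h2 : (PySem.List.pyRange 1 ((ts.length : Int)) 1).foldl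
        (fun dp i => solStep dp (PySem.List.pyGetD sa i (0, 0)).2)
        [(PySem.List.pyGetD sa 0 (0, 0)).2]
        = (PySem.List.pyRange 1 ((ts.length : Int)) 1).foldl
        (fun dp i => solStep dp (PySem.List.pyGetD ts i (0, 0)).2)
        [(PySem.List.pyGetD sa 0 (0, 0)).2] := by
      apply PySem.List.foldl_congr_mem
      intro acc x hx
      rw [PySem.List.mem_pyRange_one] at hx
      have hx2 : x < (N : Int) := by omega
      congr 1
      rw [PySem.List.pyGetD_eq_getElem sa _ (by omega) (by exact_mod_cast (by omega : x < (sa.length : Int))),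
        PySem.List.pyGetD_eq_getElem ts _ (by omega) (by omega)]
      simp only [hts, List.getElem_take]
    rw [h2]
    rw [PySem.List.foldl_pyRange_pyGetD' ts (0, 0) (fun dp v => solStep dp v.2)
      [(PySem.List.pyGetD sa 0 (0, 0)).2] (by omega : (0 : Int) ≤ 1)]
    rw [← List.foldl_map (f := Prod.snd) (g := solStep)]
    rw [List.map_drop]
    rw [← hs]
    have hd0 : (PySem.List.pyGetD sa 0 (0, 0)).2 = s.getD 0 0 := by
      have := hsget 0 (by omega)
      simpa using this
    rw [hd0]
    rcases hsc : s with _ | ⟨s0, srest⟩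
    · rw [hsc] at hslen; simp at hslen; omega
    · rw [hsc] at hnds
      simp only [List.getD_cons_zero]
      have hint : (1 : Int).toNat = 1 := rfl
      rw [hint]
      exact_mod_cast A_len s0 srest hnds
  -- B's max dp equals Ml s
  have hB : solution_alt n arr = n - (Ml s : Int) := by
    show n - _ = n - (Ml s : Int)
    congr 1
    have hrange : PySem.List.pyRange 1 n 1 = PySem.List.pyRange 1 ((N : Int)) 1 := by rw [hNn]
    rw [hrange, outerB sa s hsget N (by omega) (by omega)]
    obtain ⟨M, hM⟩ : ∃ M, N = M + 1 := ⟨N - 1, by omega⟩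
    have hsl : s.length = M + 1 := by omega
    rw [hM, B_val s M (by omega)]
    congr 2
    rw [← hsl]
    exact List.take_length
  rw [hA, hB]

-- ===== VERDICT =====
theorem solution_spec : Claim_equal_solution := by
  unfold Claim_equal_solution
  intro n arr _hdom hpre
  obtain ⟨hne, hnlen, hnd⟩ := hpre
  unfold Spec_solution
  by_cases hn1 : 1 ≤ n
  · exact main_eq n arr hn1 hnlen hnd
  · -- n ≤ 0: both loops are empty; A returns n - len([arr[0][1]]) = n - 1 and B n - max([1]) = n - 1
    show solution n arr = solution_alt n arr
    unfold solution solution_alt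
    rw [PySem.List.pyRange_one_eq_nil (by omega)]
    simp [PySem.List.max?_id_cons]
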